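-- pv_equiv track=rewrite | github.com/Dysk1ddy/swordcoast | dnd_game/gameplay/spell_slots.py | restored_spell_slot_summary
-- ===== SOURCE A (Python) =====
-- def restored_spell_slot_summary(levels: list[int]) -> str:
--     if not levels:
--         return ""
--     counts: dict[int, int] = {}
--     for level in levels:
--         counts[level] = counts.get(level, 0) + 1
--     parts = [f"{count} level {level} slot{'s' if count != 1 else ''}" for level, count in sorted(counts.items())]
--     return ", ".join(parts)
-- ===== SOURCE B (Python) =====
-- def restored_spell_slot_summary(levels: list[int]) -> str:
--     xs = sorted(levels)
--     parts = []
--     i, n = 0, len(xs)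
--     while i < n:
--         j = i + 1
--         while j < n and xs[j] == xs[i]:
--             j += 1
--         count = j - i
--         parts.append(f"{count} level {xs[i]} slot{'s' if count != 1 else ''}")
--         i = j
--     return ", ".join(parts)
-- ===== Notes on version B (the rewrite author's own statement) =====
-- stated objective: alternative
-- what changed: Replaces the count-dict-then-sort-of-items scheme by sorting the input once and scanning adjacent equal runs with two indices, so no count table exists and the pairs are produced already in order.
import Mathlib
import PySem

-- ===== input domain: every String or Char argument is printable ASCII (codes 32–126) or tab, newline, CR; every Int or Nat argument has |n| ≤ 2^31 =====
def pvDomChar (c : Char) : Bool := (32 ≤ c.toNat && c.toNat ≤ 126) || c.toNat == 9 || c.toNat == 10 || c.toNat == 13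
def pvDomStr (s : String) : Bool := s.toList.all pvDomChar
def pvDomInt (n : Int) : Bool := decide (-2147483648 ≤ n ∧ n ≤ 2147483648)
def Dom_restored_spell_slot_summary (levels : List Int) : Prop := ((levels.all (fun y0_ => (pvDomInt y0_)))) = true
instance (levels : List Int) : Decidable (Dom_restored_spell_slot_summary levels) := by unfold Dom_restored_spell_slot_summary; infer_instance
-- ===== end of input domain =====

-- B sorts the input once and scans adjacent equal runs (two-index scan, no count table);
-- A counts into a dict and sorts the dict items. Return values proved equal on all inputs.

-- ===== PORT A =====
-- shared formatting helper: the f-string  f"{count} level {level} slot{'s' if count != 1 else ''}"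
-- (identical in both Pythons; p = (level, count))
def pvFmt (p : Int × Int) : String :=
  PySem.Int.toStr p.2 ++ " level " ++ PySem.Int.toStr p.1 ++ " slot" ++ (if p.2 ≠ 1 then "s" else "")

def restored_spell_slot_summary (levels : List Int) : String :=
  if levels = [] then ""
  else
    let counts := levels.foldl (fun d l => d.insert l (d.getD l 0 + 1)) (PySem.Dict.empty : PySem.Dict Int Int)
    -- sorted(counts.items()): default tuple (lexicographic) comparison → sorted2
    PySem.Str.join ", " ((PySem.List.sorted2 counts.items Prod.fst Prod.snd false).map pvFmt)

-- ===== PORT B =====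
-- the outer while-loop of Source B advances i run by run; the inner scan for j is the
-- leading run of the suffix, ported exactly as takeWhile/dropWhile on the suffix list
def pvRuns : List Int → List (Int × Int)
  | [] => []
  | x :: t =>
      (x, 1 + ((t.takeWhile (· == x)).length : Int)) :: pvRuns (t.dropWhile (· == x))
termination_by s => s.length
decreasing_by
  have := List.length_dropWhile_le (· == x) t
  simp only [List.length_cons]; omega

def restored_spell_slot_summary_alt (levels : List Int) : String :=
  PySem.Str.join ", " ((pvRuns (PySem.List.sorted levels (fun x => x) false)).map pvFmt)

-- ===== PRECONDITION & SPEC =====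
def Spec_restored_spell_slot_summary (levels : List Int) (out : String) : Prop := out = restored_spell_slot_summary_alt levels
instance (levels : List Int) (out : String) : Decidable (Spec_restored_spell_slot_summary levels out) := by unfold Spec_restored_spell_slot_summary; infer_instance

-- ===== CLAIM (what is proved, stated in full; the proofs are below) =====
def Claim_equal_restored_spell_slot_summary : Prop := ∀ (levels : List Int), Dom_restored_spell_slot_summary levels → Spec_restored_spell_slot_summary levels (restored_spell_slot_summary levels)

-- ===== LEMMAS AND PROOFS =====

-- insertBy only looks at comparisons of the inserted element with accumulator elements
theorem pv_insertBy_congr {α : Type} (f g : α → α → Bool) (x : α) :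
    ∀ acc : List α, (∀ y ∈ acc, f x y = g x y) →
      PySem.List.insertBy f x acc = PySem.List.insertBy g x acc := by
  intro acc
  induction acc with
  | nil => intro _; rfl
  | cons y ys ih =>
      intro h
      simp only [PySem.List.insertBy]
      rw [h y (by simp)]
      by_cases hg : g x y = true
      · simp [hg]
      · simp [hg, ih (fun z hz => h z (by simp [hz]))]

-- an insertion-sort fold is unchanged when the two comparison functions agree on the input's elements
theorem pv_foldl_insertBy_congr {α : Type} (f g : α → α → Bool) :
    ∀ (xs acc : List α), (∀ a ∈ xs, ∀ b ∈ acc, f a b = g a b) →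
      (∀ a ∈ xs, ∀ b ∈ xs, f a b = g a b) →
      xs.foldl (fun acc x => PySem.List.insertBy f x acc) acc
        = xs.foldl (fun acc x => PySem.List.insertBy g x acc) acc := by
  intro xs
  induction xs with
  | nil => intro acc _ _; rfl
  | cons x t ih =>
      intro acc hxa hxx
      simp only [List.foldl_cons]
      rw [pv_insertBy_congr f g x acc (fun y hy => hxa x (by simp) y hy)]
      exact ih _ (fun a ha b hb => by
          rcases (PySem.List.mem_insertBy g x b acc).mp hb with hb | hb
          · rw [hb]; exact hxx a (by simp [ha]) x (by simp)
          · exact hxa a (by simp [ha]) b hb)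
        (fun a ha b hb => hxx a (by simp [ha]) b (by simp [hb]))

-- in a sorted list x :: t, everything after the leading run of x is strictly larger than x
theorem pv_lt_of_mem_dropWhile (x : Int) :
    ∀ t : List Int, (x :: t).Pairwise (· ≤ ·) →
      ∀ y ∈ t.dropWhile (· == x), x < y := by
  intro t
  induction t with
  | nil => intro _ y hy; simp [List.dropWhile] at hy
  | cons z t'' ih =>
      intro h y hy
      rw [List.pairwise_cons] at h
      obtain ⟨hx, h2⟩ := h
      rw [List.pairwise_cons] at h2
      obtain ⟨hz, h3⟩ := h2
      by_cases hzx : z = x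
      · subst hzx
        rw [List.dropWhile_cons_of_pos (by simp)] at hy
        exact ih (List.pairwise_cons.mpr ⟨fun b hb => hx b (by simp [hb]), h3⟩) y hy
      · rw [List.dropWhile_cons_of_neg (by simp [hzx])] at hy
        have hxz' : x < z := lt_of_le_of_ne (hx z (by simp)) (fun he => hzx he.symm)
        rcases List.mem_cons.mp hy with rfl | hy'
        · exact hxz'
        · exact lt_of_lt_of_le hxz' (hz y hy')

-- the head's count in a sorted list is 1 + the length of the leading run
theorem pv_count_head (x : Int) (t : List Int) (h : (x :: t).Pairwise (· ≤ ·)) :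
    ((x :: t).count x : Int) = 1 + ((t.takeWhile (· == x)).length : Int) := by
  have hsplit : t = t.takeWhile (· == x) ++ t.dropWhile (· == x) :=
    (List.takeWhile_append_dropWhile).symm
  have h1 : (t.takeWhile (· == x)).count x = (t.takeWhile (· == x)).length := by
    rw [List.count_eq_length]
    intro b hb
    have hbx : b = x := by simpa using List.mem_takeWhile_imp hb
    exact hbx.symm
  have h2 : (t.dropWhile (· == x)).count x = 0 := by
    rw [List.count_eq_zero]
    intro hx
    exact absurd (pv_lt_of_mem_dropWhile x t h x hx) (lt_irrefl x)
  rw [List.count_cons_self]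
  conv_lhs => rw [hsplit]
  rw [List.count_append, h1, h2]
  push_cast
  ring

-- membership in the run list of a sorted list: exactly the (level, multiplicity) pairs
theorem pv_mem_runs : ∀ (s : List Int), s.Pairwise (· ≤ ·) → ∀ (k c : Int),
    ((k, c) ∈ pvRuns s ↔ k ∈ s ∧ c = (s.count k : Int)) := by
  intro s
  induction s using pvRuns.induct with
  | case1 => intro _ k c; simp [pvRuns]
  | case2 x t ih =>
      intro h k c
      have ht' : (t.dropWhile (· == x)).Pairwise (· ≤ ·) :=
        h.tail.sublist (List.dropWhile_sublist _)
      have hxlt := pv_lt_of_mem_dropWhile x t h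
      rw [pvRuns]
      simp only [List.mem_cons, Prod.mk.injEq, ih ht' k c]
      constructor
      · rintro (⟨rfl, rfl⟩ | ⟨hk, rfl⟩)
        · exact ⟨by simp, (pv_count_head k t h).symm⟩
        · have hkne : k ≠ x := fun he => absurd (hxlt k (he ▸ hk)) (by simp [he])
          have hkt : k ∈ t := (List.dropWhile_sublist (· == x)).mem hk
          refine ⟨by simp [hkt], ?_⟩
          congr 1
          -- count k (x :: t) = count k (dropWhile)
          have hsplit : t = t.takeWhile (· == x) ++ t.dropWhile (· == x) :=
            (List.takeWhile_append_dropWhile).symm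
          have htk : (t.takeWhile (· == x)).count k = 0 := by
            rw [List.count_eq_zero]
            intro hmem
            exact hkne (by simpa using List.mem_takeWhile_imp hmem)
          rw [List.count_cons_of_ne (Ne.symm hkne)]
          conv_rhs => rw [hsplit]
          rw [List.count_append, htk]
          exact (Nat.zero_add _).symm
      · rintro ⟨hk, rfl⟩
        by_cases hkx : k = x
        · subst hkx
          exact Or.inl ⟨rfl, pv_count_head k t h⟩
        · right
          have hkt : k ∈ t := by
            rcases hk with rfl | hkt
            · exact absurd rfl hkx
            · exact hkt
          have hkd : k ∈ t.dropWhile (· == x) := by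
            have hsplit : t = t.takeWhile (· == x) ++ t.dropWhile (· == x) :=
              (List.takeWhile_append_dropWhile).symm
            rcases List.mem_append.mp (hsplit ▸ hkt) with hmem | hmem
            · exact absurd (by simpa using List.mem_takeWhile_imp hmem) hkx
            · exact hmem
          refine ⟨hkd, ?_⟩
          congr 1
          have hsplit : t = t.takeWhile (· == x) ++ t.dropWhile (· == x) :=
            (List.takeWhile_append_dropWhile).symm
          have htk : (t.takeWhile (· == x)).count k = 0 := by
            rw [List.count_eq_zero]
            intro hmem
            exact hkx (by simpa using List.mem_takeWhile_imp hmem)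
          rw [List.count_cons_of_ne (Ne.symm hkx)]
          conv_lhs => rw [hsplit]
          rw [List.count_append, htk]
          exact Nat.zero_add _

-- the run list of a sorted list has strictly increasing levels
theorem pv_runs_pairwise : ∀ (s : List Int), s.Pairwise (· ≤ ·) →
    (pvRuns s).Pairwise (fun a b => a.1 < b.1) := by
  intro s
  induction s using pvRuns.induct with
  | case1 => intro _; simp [pvRuns]
  | case2 x t ih =>
      intro h
      have ht' : (t.dropWhile (· == x)).Pairwise (· ≤ ·) :=
        h.tail.sublist (List.dropWhile_sublist _)
      rw [pvRuns]
      constructor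
      · intro b hb
        obtain ⟨k, c, rfl⟩ : ∃ k c, b = (k, c) := ⟨b.1, b.2, rfl⟩
        have := (pv_mem_runs _ ht' k c).mp hb
        exact pv_lt_of_mem_dropWhile x t h k this.1
      · exact ih ht'

-- A's sorted dict items coincide with B's run list of the sorted input
theorem pv_items_eq_runs (levels : List Int) :
    PySem.List.sorted2
      (levels.foldl (fun d l => d.insert l (d.getD l 0 + 1)) (PySem.Dict.empty : PySem.Dict Int Int)).items
      Prod.fst Prod.snd false
    = pvRuns (PySem.List.sorted levels (fun x => x) false) := by
  have hitems : (levels.foldl (fun d l => d.insert l (d.getD l 0 + 1))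
      (PySem.Dict.empty : PySem.Dict Int Int)).items
      = (PySem.Set.ofList levels).map (fun k => (k, (levels.count k : Int))) := by
    rw [PySem.Dict.foldl_insert_getD_add_one_eq_counter, PySem.Dict.items_counter]
  set s := PySem.List.sorted levels (fun x => x) false with hs
  have hsp : s.Pairwise (· ≤ ·) := PySem.List.sorted_pairwise levels (fun x => x)
  have hperm : s.Perm levels := PySem.List.sorted_perm levels (fun x => x) false
  -- the two comparison functions agree on every pair of items
  have hfg : ∀ a ∈ (levels.foldl (fun d l => d.insert l (d.getD l 0 + 1))
        (PySem.Dict.empty : PySem.Dict Int Int)).items,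
      ∀ b ∈ (levels.foldl (fun d l => d.insert l (d.getD l 0 + 1))
        (PySem.Dict.empty : PySem.Dict Int Int)).items,
      (fun a b : Int × Int => decide (a.1 < b.1) || (!decide (b.1 < a.1) && decide (a.2 < b.2))) a b
        = (fun a b : Int × Int => decide (a.1 < b.1)) a b := by
    rw [hitems]
    intro a ha b hb
    simp only [List.mem_map] at ha hb
    obtain ⟨k1, _, rfl⟩ := ha
    obtain ⟨k2, _, rfl⟩ := hb
    rcases lt_trichotomy k1 k2 with hlt | heq | hgt
    · simp [hlt, not_lt_of_gt hlt]
    · subst heq; simp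
    · simp [hgt, not_lt_of_gt hgt]
  have hcongr : PySem.List.sorted2
      (levels.foldl (fun d l => d.insert l (d.getD l 0 + 1)) (PySem.Dict.empty : PySem.Dict Int Int)).items
      Prod.fst Prod.snd false
      = PySem.List.sorted
        (levels.foldl (fun d l => d.insert l (d.getD l 0 + 1)) (PySem.Dict.empty : PySem.Dict Int Int)).items
        Prod.fst := by
    rw [PySem.List.sorted_eq_foldl_insertBy]
    show List.foldl _ [] _ = _
    exact pv_foldl_insertBy_congr _ _ _ [] (by simp) hfg
  rw [hcongr]
  apply PySem.List.sorted_eq_of_perm_of_pairwise_lt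
  · -- permutation
    rw [hitems]
    have hinj : Function.Injective (fun k : Int => (k, (levels.count k : Int))) := by
      intro a b hab
      simpa using congrArg Prod.fst hab
    refine (List.perm_ext_iff_of_nodup ?_ ?_).mpr ?_
    · exact (pv_runs_pairwise s hsp).imp (fun {a b} hab he => absurd hab (by simp [he]))
    · exact (PySem.Set.nodup_ofList levels).map hinj
    · intro a
      obtain ⟨k, c, rfl⟩ : ∃ k c, a = (k, c) := ⟨a.1, a.2, rfl⟩
      rw [pv_mem_runs s hsp k c]
      simp only [List.mem_map, PySem.Set.mem_ofList, Prod.mk.injEq]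
      constructor
      · rintro ⟨hk, rfl⟩
        exact ⟨k, hperm.mem_iff.mp hk, rfl, by rw [hperm.count_eq]⟩
      · rintro ⟨k', hk', rfl, rfl⟩
        exact ⟨hperm.mem_iff.mpr hk', by rw [hperm.count_eq]⟩
  · exact pv_runs_pairwise s hsp

-- ===== VERDICT (by name: the statement is the Claim_ definition above) =====
theorem restored_spell_slot_summary_spec : Claim_equal_restored_spell_slot_summary := by
  intro levels _
  unfold Spec_restored_spell_slot_summary restored_spell_slot_summary restored_spell_slot_summary_alt
  by_cases h0 : levels = []
  · subst h0
    rw [if_pos rfl]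
    simp [pvRuns, PySem.List.sorted, PySem.Str.join]
  · rw [if_neg h0]
    show PySem.Str.join ", "
        ((PySem.List.sorted2
          (levels.foldl (fun d l => d.insert l (d.getD l 0 + 1)) (PySem.Dict.empty : PySem.Dict Int Int)).items
          Prod.fst Prod.snd false).map pvFmt) = _
    rw [pv_items_eq_runs]
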